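-- pv_equiv track=rewrite | github.com/AlexBuccheri/python | exciting/gw_benchmark_outputs/set1/plots.py | restructure_energy_cutoffs
-- ===== SOURCE A (Python) =====
-- def restructure_energy_cutoffs(energy_cutoffs: dict) -> list:
--     """
--     Get in a more useful structure to iterate over
--
--     """
--     restructured_energies = []
--
--     for inum in range(0, 4):
--         data = {}
--         for species, l_channels in  energy_cutoffs.items():
--             data[species] = {l:energies[inum] for l, energies in l_channels.items()}
--         restructured_energies.append(data)
--
--     return restructured_energies
-- ===== SOURCE B (Python) =====
-- def restructure_energy_cutoffs(energy_cutoffs: dict) -> list: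
--     """
--     Get in a more useful structure to iterate over
--
--     """
--     species_list = list(energy_cutoffs)
--     per_species = []
--     for l_channels in energy_cutoffs.values():
--         ls = list(l_channels)
--         cols = list(zip(*l_channels.values()))
--         per_species.append([dict(zip(ls, cols[i])) if ls else {} for i in range(4)])
--     return [dict(zip(species_list, (p[i] for p in per_species))) for i in range(4)]
-- ===== Notes on version B (the rewrite author's own statement) =====
-- stated objective: alternative
-- what changed: B computes the result by zip-transposing each species' energies lists into columns (list(zip(*l_channels.values()))) and assembling each of the four output dicts with dict(zip(keys, column)), instead of A's four full passes that rebuild nested dicts entry by entry with indexed reads energies[inum].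
import Mathlib
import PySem

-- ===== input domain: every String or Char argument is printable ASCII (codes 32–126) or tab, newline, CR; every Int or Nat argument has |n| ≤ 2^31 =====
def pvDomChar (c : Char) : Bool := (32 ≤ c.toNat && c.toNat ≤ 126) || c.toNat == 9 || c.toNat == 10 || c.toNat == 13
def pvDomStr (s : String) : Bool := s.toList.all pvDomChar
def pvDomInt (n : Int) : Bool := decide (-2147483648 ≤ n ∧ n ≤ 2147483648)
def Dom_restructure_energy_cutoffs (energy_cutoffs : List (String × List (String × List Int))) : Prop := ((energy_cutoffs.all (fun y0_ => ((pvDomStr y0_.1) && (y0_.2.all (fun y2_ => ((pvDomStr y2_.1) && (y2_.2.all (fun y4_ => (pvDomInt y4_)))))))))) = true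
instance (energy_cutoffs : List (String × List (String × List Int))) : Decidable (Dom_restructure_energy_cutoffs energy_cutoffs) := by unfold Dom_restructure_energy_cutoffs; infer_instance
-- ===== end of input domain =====

-- B builds the four output layers by zip-transposing each species' energies lists into
-- columns and assembling dicts with dict(zip(keys, column)), instead of A's four full
-- passes rebuilding nested dicts entry by entry with indexed reads; same cost class.


-- ===== PORT A =====
-- 'energies[inum]' is PySem.List.pyGet?; Pre_ guarantees the index is in range, so '.getD 0'
-- is never taken on admitted inputs.  Dicts are built as PySem.Dict and flattened to the
-- association-list convention at the end.
def restructure_energy_cutoffs (energy_cutoffs : List (String × List (String × List Int))) : List (List (String × List (String × Int))) :=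
  ((PySem.List.pyRange 0 4 1).foldl (fun restructured_energies inum =>
      restructured_energies ++
        [energy_cutoffs.foldl (fun data p =>
            data.insert p.1
              (p.2.foldl (fun m q => m.insert q.1 ((PySem.List.pyGet? q.2 inum).getD 0))
                PySem.Dict.empty))
          PySem.Dict.empty])
    []).map (fun d => d.items.map (fun p => (p.1, p.2.items)))

-- ===== PORT B =====
-- zip(*rows) is the min-length transpose; ported exactly as pvZipStar below (fuel = the
-- first row's length, always at least the minimum, so it is exact on every input).
def pvZipStarAux : Nat → List (List Int) → List (List Int)
  | 0, _ => []
  | n + 1, rows =>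
      if rows.all (fun l => !l.isEmpty) then
        (rows.map List.headI) :: pvZipStarAux n (rows.map List.tail)
      else []

def pvZipStar (rows : List (List Int)) : List (List Int) :=
  match rows with
  | [] => []
  | r :: rs => pvZipStarAux r.length (r :: rs)

-- 'cols[i]' / 'p[i]' are PySem.List.pyGet? (IndexError = none; '.getD []' never taken
-- inside Pre_); dict(zip(ks, vs)) is PySem.Dict.ofList (ks.zip vs), whose items we output.
def restructure_energy_cutoffs_alt (energy_cutoffs : List (String × List (String × List Int))) : List (List (String × List (String × Int))) :=
  let d := PySem.Dict.ofList energy_cutoffs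
  let species_list := d.keys
  let per_species := d.values.map (fun l_channels =>
    let dl := PySem.Dict.ofList l_channels
    let ls := dl.keys
    let cols := pvZipStar dl.values
    (PySem.List.pyRange 0 4 1).map (fun i =>
      if ls.isEmpty then ([] : List (String × Int))
      else (PySem.Dict.ofList (ls.zip ((PySem.List.pyGet? cols i).getD []))).items))
  (PySem.List.pyRange 0 4 1).map (fun i =>
    (PySem.Dict.ofList (species_list.zip (per_species.map (fun p => (PySem.List.pyGet? p i).getD [])))).items)

-- ===== PRECONDITION & SPEC =====
-- an energies list long enough for all four indexed reads (length at least four)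
def pvEnergiesLongEnough (xs : List Int) : Bool :=
  match xs with
  | _ :: _ :: _ :: _ :: _ => true
  | _ => false

-- Pre_ excludes exactly the inputs on which Python A raises IndexError: some energies list
-- with fewer than four entries.  Duplicate keys in the association lists are collapsed by
-- Python's dict (last value wins) before any indexing, hence the condition is stated on
-- the deduplicated dicts.
def Pre_restructure_energy_cutoffs (energy_cutoffs : List (String × List (String × List Int))) : Prop :=
  ∀ p ∈ (PySem.Dict.ofList energy_cutoffs).items, ∀ q ∈ (PySem.Dict.ofList p.2).items,
    pvEnergiesLongEnough q.2 = true
instance (energy_cutoffs : List (String × List (String × List Int))) : Decidable (Pre_restructure_energy_cutoffs energy_cutoffs) := by unfold Pre_restructure_energy_cutoffs; infer_instance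

def pvWitness_restructure_energy_cutoffs : (List (String × List (String × List Int))) :=
  [("Mg", [("f", [116, 112, 100, 112])]), ("Al", [("f", [8, 25, 9, 27])]), ("C", [])]

def Spec_restructure_energy_cutoffs (energy_cutoffs : List (String × List (String × List Int))) (out : List (List (String × List (String × Int)))) : Prop := out = restructure_energy_cutoffs_alt energy_cutoffs
instance (energy_cutoffs : List (String × List (String × List Int))) (out : List (List (String × List (String × Int)))) : Decidable (Spec_restructure_energy_cutoffs energy_cutoffs out) := by unfold Spec_restructure_energy_cutoffs; infer_instance

-- ===== CLAIM (what is proved, stated in full; the proofs are below) =====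
def Claim_equal_restructure_energy_cutoffs : Prop := ∀ (energy_cutoffs : List (String × List (String × List Int))), Dom_restructure_energy_cutoffs energy_cutoffs → Pre_restructure_energy_cutoffs energy_cutoffs → Spec_restructure_energy_cutoffs energy_cutoffs (restructure_energy_cutoffs energy_cutoffs)

-- ===== LEMMAS AND PROOFS =====

-- indexing with a nonnegative in-range Int index reads the list
theorem pv_pyGet_pos {α : Type} (xs : List α) (i : Int) (dflt : α)
    (h0 : 0 ≤ i) (h : i.toNat < xs.length) :
    PySem.List.pyGet? xs i = some (xs.getD i.toNat dflt) := by
  simp only [PySem.List.pyGet?, PySem.List.pyIdx?]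
  rw [if_pos h0, if_pos (by omega)]
  simp [List.getD, List.getElem?_eq_getElem h]

-- a fold of inserts whose value is g of the stored value builds the value-mapped dict
theorem pv_fold_insert_items {ν μ : Type} (g : ν → μ) (l : List (String × ν))
    (d : PySem.Dict String ν) (dg : PySem.Dict String μ)
    (h : dg.items = d.items.map (fun p => (p.1, g p.2))) :
    (l.foldl (fun a p => a.insert p.1 (g p.2)) dg).items
      = (l.foldl (fun a p => a.insert p.1 p.2) d).items.map (fun p => (p.1, g p.2)) := by
  induction l generalizing d dg with
  | nil => simpa using h
  | cons p rest ih =>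
      simp only [List.foldl_cons]
      apply ih
      have hkeys : dg.keys = d.keys := by
        simp only [PySem.Dict.keys, h, List.map_map]; rfl
      have hc : dg.contains p.1 = d.contains p.1 := by
        simp [PySem.Dict.contains_eq_decide_mem_keys, hkeys]
      rw [PySem.Dict.items_insert, PySem.Dict.items_insert, hc]
      by_cases hcd : d.contains p.1 = true
      · simp only [hcd, if_true, h, List.map_map]
        apply List.map_congr_left
        intro q _
        by_cases hq : q.1 = p.1 <;> simp [hq]
      · simp [hcd, h]

-- column i of the transpose, when every row is longer than i and the fuel exceeds i
theorem pv_aux_get (i : Nat) : ∀ (f : Nat) (rows : List (List Int)), i < f →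
    (∀ r ∈ rows, i < r.length) →
    (pvZipStarAux f rows)[i]? = some (rows.map (fun r => r.getD i 0)) := by
  induction i with
  | zero =>
      intro f rows hf hlen
      match f, hf with
      | f + 1, _ =>
        have hall : rows.all (fun l => !l.isEmpty) = true := by
          simp only [List.all_eq_true]
          intro r hr
          have := hlen r hr
          cases r <;> simp_all
        simp only [pvZipStarAux, hall, if_true, List.getElem?_cons_zero, Option.some.injEq]
        apply List.map_congr_left
        intro r hr
        have := hlen r hr
        cases r <;> simp_all [List.headI]
  | succ i ih =>
      intro f rows hf hlen
      match f, hf with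
      | f + 1, hf =>
        have hall : rows.all (fun l => !l.isEmpty) = true := by
          simp only [List.all_eq_true]
          intro r hr
          have := hlen r hr
          cases r <;> simp_all
        simp only [pvZipStarAux, hall, if_true, List.getElem?_cons_succ]
        rw [ih f (rows.map List.tail) (by omega) (by
          intro r hr
          simp only [List.mem_map] at hr
          obtain ⟨r', hr', rfl⟩ := hr
          have := hlen r' hr'
          cases r' with
          | nil => simp at this
          | cons a t =>
              simp only [List.tail_cons]
              simp only [List.length_cons] at this
              omega)]
        simp only [List.map_map, Option.some.injEq]
        apply List.map_congr_left
        intro r hr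
        have := hlen r hr
        cases r <;> simp_all

-- association list with distinct keys: Dict.ofList keeps it as is
theorem pv_items_ofList_nodup {ν : Type} (l : List (String × ν)) (h : (l.map Prod.fst).Nodup) :
    (PySem.Dict.ofList l).items = l := by
  have := PySem.Dict.items_foldl_insert_fresh (l := l) (k := Prod.fst) (v := Prod.snd)
    (d := (PySem.Dict.empty : PySem.Dict String ν)) (by intro a _; rfl) h
  simpa using this

-- one species' column dict in B equals the value-mapped inner dict of A, per index
theorem pv_inner_eq (lch : List (String × List Int)) (i : Int) (h0 : 0 ≤ i)
    (hq : ∀ q ∈ (PySem.Dict.ofList lch).items, pvEnergiesLongEnough q.2 = true)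
    (h4 : i.toNat < 4) :
    (if (PySem.Dict.ofList lch).keys.isEmpty then ([] : List (String × Int))
     else (PySem.Dict.ofList (((PySem.Dict.ofList lch).keys).zip
            ((PySem.List.pyGet? (pvZipStar ((PySem.Dict.ofList lch).values)) i).getD []))).items)
      = (PySem.Dict.ofList lch).items.map (fun q => (q.1, (PySem.List.pyGet? q.2 i).getD 0)) := by
  set dl := PySem.Dict.ofList lch with hdl
  have hlen : ∀ r ∈ dl.values, i.toNat < r.length := by
    intro r hr
    simp only [PySem.Dict.values, List.mem_map] at hr
    obtain ⟨q, hqm, rfl⟩ := hr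
    have := hq q hqm
    unfold pvEnergiesLongEnough at this
    match h' : q.2, this with
    | _ :: _ :: _ :: _ :: _, _ => simp only [List.length_cons]; omega
  by_cases hemp : dl.items = []
  · simp [PySem.Dict.keys, hemp]
  · have hkeysne : dl.keys.isEmpty = false := by
      simp only [PySem.Dict.keys]
      cases h : dl.items <;> simp_all
    rw [if_neg (by simp [hkeysne])]
    have hvalne : ∃ r rs, dl.values = r :: rs := by
      simp only [PySem.Dict.values]
      cases h : dl.items with
      | nil => exact absurd h hemp
      | cons a t => exact ⟨a.2, t.map Prod.snd, by simp⟩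
    obtain ⟨r, rs, hval⟩ := hvalne
    have hcol : (pvZipStar dl.values)[i.toNat]? = some (dl.values.map (fun r => r.getD i.toNat 0)) := by
      rw [hval]
      unfold pvZipStar
      apply pv_aux_get
      · have := hlen r (by rw [hval]; exact List.mem_cons_self)
        omega
      · intro r' hr'; exact hlen r' (by rw [hval]; exact hr')
    have hltz : i.toNat < (pvZipStar dl.values).length :=
      (List.getElem?_eq_some_iff.mp hcol).1
    have hget : PySem.List.pyGet? (pvZipStar dl.values) i
        = some (dl.values.map (fun r => r.getD i.toNat 0)) := by
      rw [pv_pyGet_pos _ i [] h0 hltz]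
      rw [List.getD_eq_getElem?_getD, hcol]
      rfl
    rw [hget]
    simp only [Option.getD_some]
    rw [pv_items_ofList_nodup]
    · -- keys.zip (values.map g) = items.map (fun q => (q.1, g q.2))
      simp only [PySem.Dict.keys, PySem.Dict.values, List.map_map]
      rw [List.zip_map']
      apply List.map_congr_left
      intro q hqm
      have hql : i.toNat < q.2.length := by
        apply hlen
        simp only [PySem.Dict.values, List.mem_map]
        exact ⟨q, hqm, rfl⟩
      rw [pv_pyGet_pos _ i 0 h0 hql]
      rfl
    · -- fst of the zip is exactly the (nodup) key list
      have hlenq : ((PySem.Dict.ofList lch).keys).length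
          ≤ (dl.values.map (fun r => r.getD i.toNat 0)).length := by
        simp [PySem.Dict.keys, PySem.Dict.values, hdl]
      rw [List.map_fst_zip hlenq]
      exact PySem.Dict.nodup_keys_ofList lch

-- the four literal indices of range(4)
theorem pv_range4 : PySem.List.pyRange 0 4 1 = [0, 1, 2, 3] := by decide

-- one whole layer of A, as the value-mapped outer dict
theorem pv_A_layer (ec : List (String × List (String × List Int))) (i : Int) :
    (ec.foldl (fun data p =>
        data.insert p.1
          (p.2.foldl (fun m q => m.insert q.1 ((PySem.List.pyGet? q.2 i).getD 0))
            PySem.Dict.empty))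
      PySem.Dict.empty).items.map (fun p => (p.1, p.2.items))
      = (PySem.Dict.ofList ec).items.map (fun p =>
          (p.1, (PySem.Dict.ofList p.2).items.map (fun q => (q.1, (PySem.List.pyGet? q.2 i).getD 0)))) := by
  have houter := pv_fold_insert_items
    (g := fun lch : List (String × List Int) =>
      lch.foldl (fun m q => m.insert q.1 ((PySem.List.pyGet? q.2 i).getD 0)) PySem.Dict.empty)
    (l := ec) (d := PySem.Dict.empty) (dg := PySem.Dict.empty) (by rfl)
  rw [houter, List.map_map]
  apply List.map_congr_left
  intro p _
  have hinner := pv_fold_insert_items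
    (g := fun es : List Int => (PySem.List.pyGet? es i).getD 0)
    (l := p.2) (d := PySem.Dict.empty) (dg := PySem.Dict.empty) (by rfl)
  simp only [Function.comp]
  rw [hinner]
  rfl

-- keys zipped with mapped values is the value-mapped items list
theorem pv_zip_keys_values {ν μ : Type} (d : PySem.Dict String ν) (g : ν → μ) :
    d.keys.zip (d.values.map g) = d.items.map (fun p => (p.1, g p.2)) := by
  simp only [PySem.Dict.keys, PySem.Dict.values, List.map_map]
  exact List.zip_map'

-- one whole layer of B, reduced to the same value-mapped outer dict
theorem pv_B_layer (ec : List (String × List (String × List Int))) (i : Int)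
    (h0 : 0 ≤ i) (h4 : i.toNat < 4)
    (hpre : Pre_restructure_energy_cutoffs ec) :
    (PySem.Dict.ofList
      (((PySem.Dict.ofList ec).keys).zip
        (((PySem.Dict.ofList ec).values.map (fun l_channels =>
            ([if (PySem.Dict.ofList l_channels).keys.isEmpty then ([] : List (String × Int))
              else (PySem.Dict.ofList (((PySem.Dict.ofList l_channels).keys).zip
                     ((PySem.List.pyGet? (pvZipStar ((PySem.Dict.ofList l_channels).values)) 0).getD []))).items,
              if (PySem.Dict.ofList l_channels).keys.isEmpty then ([] : List (String × Int))
              else (PySem.Dict.ofList (((PySem.Dict.ofList l_channels).keys).zip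
                     ((PySem.List.pyGet? (pvZipStar ((PySem.Dict.ofList l_channels).values)) 1).getD []))).items,
              if (PySem.Dict.ofList l_channels).keys.isEmpty then ([] : List (String × Int))
              else (PySem.Dict.ofList (((PySem.Dict.ofList l_channels).keys).zip
                     ((PySem.List.pyGet? (pvZipStar ((PySem.Dict.ofList l_channels).values)) 2).getD []))).items,
              if (PySem.Dict.ofList l_channels).keys.isEmpty then ([] : List (String × Int))
              else (PySem.Dict.ofList (((PySem.Dict.ofList l_channels).keys).zip
                     ((PySem.List.pyGet? (pvZipStar ((PySem.Dict.ofList l_channels).values)) 3).getD []))).items] : List (List (String × Int))))).map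
          (fun p => (PySem.List.pyGet? p i).getD [])))).items
      = (PySem.Dict.ofList ec).items.map (fun p =>
          (p.1, (PySem.Dict.ofList p.2).items.map (fun q => (q.1, (PySem.List.pyGet? q.2 i).getD 0)))) := by
  have hpick : ∀ lch : List (String × List Int),
      (PySem.List.pyGet? ([if (PySem.Dict.ofList lch).keys.isEmpty then ([] : List (String × Int))
        else (PySem.Dict.ofList (((PySem.Dict.ofList lch).keys).zip
               ((PySem.List.pyGet? (pvZipStar ((PySem.Dict.ofList lch).values)) 0).getD []))).items,
        if (PySem.Dict.ofList lch).keys.isEmpty then ([] : List (String × Int))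
        else (PySem.Dict.ofList (((PySem.Dict.ofList lch).keys).zip
               ((PySem.List.pyGet? (pvZipStar ((PySem.Dict.ofList lch).values)) 1).getD []))).items,
        if (PySem.Dict.ofList lch).keys.isEmpty then ([] : List (String × Int))
        else (PySem.Dict.ofList (((PySem.Dict.ofList lch).keys).zip
               ((PySem.List.pyGet? (pvZipStar ((PySem.Dict.ofList lch).values)) 2).getD []))).items,
        if (PySem.Dict.ofList lch).keys.isEmpty then ([] : List (String × Int))
        else (PySem.Dict.ofList (((PySem.Dict.ofList lch).keys).zip
               ((PySem.List.pyGet? (pvZipStar ((PySem.Dict.ofList lch).values)) 3).getD []))).items] : List (List (String × Int))) i).getD []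
      = (if (PySem.Dict.ofList lch).keys.isEmpty then ([] : List (String × Int))
        else (PySem.Dict.ofList (((PySem.Dict.ofList lch).keys).zip
               ((PySem.List.pyGet? (pvZipStar ((PySem.Dict.ofList lch).values)) i).getD []))).items) := by
    intro lch
    rw [pv_pyGet_pos _ i [] h0 (by simp; omega)]
    have hi4 : i < 4 := by omega
    interval_cases i <;> simp
  rw [List.map_map, pv_zip_keys_values,
    pv_items_ofList_nodup _ (by rw [List.map_map]; exact PySem.Dict.nodup_keys_ofList ec)]
  apply List.map_congr_left
  intro p hp
  simp only [Function.comp]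
  rw [hpick p.2]
  exact congrArg (fun t => (p.1, t)) (pv_inner_eq p.2 i h0 (hpre p hp) h4)

-- ===== VERDICT (by name: the statement is the Claim_ definition above) =====
theorem restructure_energy_cutoffs_spec : Claim_equal_restructure_energy_cutoffs := by
  intro ec _hdom hpre
  unfold Spec_restructure_energy_cutoffs
  simp only [restructure_energy_cutoffs, restructure_energy_cutoffs_alt, pv_range4]
  simp only [List.foldl_cons, List.foldl_nil, List.map_cons, List.map_nil, List.nil_append,
    List.cons_append]
  rw [pv_A_layer ec 0, pv_A_layer ec 1, pv_A_layer ec 2, pv_A_layer ec 3,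
    pv_B_layer ec 0 (by omega) (by omega) hpre, pv_B_layer ec 1 (by omega) (by omega) hpre,
    pv_B_layer ec 2 (by omega) (by omega) hpre, pv_B_layer ec 3 (by omega) (by omega) hpre]
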